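-- pv_equiv track=rewrite | github.com/mlieftinck/GONNECT | data/GO_preprocessing.py | layer_overlap
-- ===== SOURCE A (Python) =====
-- def layer_overlap(layers):
--     """Returns a dict containing the intersection of each possible pair of layers"""
--     overlap = {}
--     k = 0
--     for k in range(len(layers) - 1):
--         for i in range(k + 1, len(layers)):
--             if i == k:
--                 pass
--             else:
--                 overlap[(k, i)] = layers[k].intersection(layers[i])
--     return overlap
-- ===== SOURCE B (Python) =====
-- def layer_overlap(layers):
--     """Returns a dict containing the intersection of each possible pair of layers"""
--     n = len(layers)
--     index = {}
--     for j, layer in enumerate(layers):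
--         for e in layer:
--             index.setdefault(e, []).append(j)
--     overlap = {(k, i): set() for k in range(n - 1) for i in range(k + 1, n)}
--     for k in range(n - 1):
--         for e in layers[k]:
--             for i in index[e]:
--                 if k < i:
--                     overlap[(k, i)].add(e)
--     return overlap
-- ===== Notes on version B (the rewrite author's own statement) =====
-- stated objective: alternative
-- what changed: Replaces the pair-driven double loop that computes a full set intersection per pair with an element-driven scheme: an inverted index (element -> sorted list of layer indices) is built in one pass, all C(n,2) pair keys are pre-initialized to empty sets, and then each element of layers[k] is routed via the index directly to the pairs (k,i) whose intersection it belongs to.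
import Mathlib
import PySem

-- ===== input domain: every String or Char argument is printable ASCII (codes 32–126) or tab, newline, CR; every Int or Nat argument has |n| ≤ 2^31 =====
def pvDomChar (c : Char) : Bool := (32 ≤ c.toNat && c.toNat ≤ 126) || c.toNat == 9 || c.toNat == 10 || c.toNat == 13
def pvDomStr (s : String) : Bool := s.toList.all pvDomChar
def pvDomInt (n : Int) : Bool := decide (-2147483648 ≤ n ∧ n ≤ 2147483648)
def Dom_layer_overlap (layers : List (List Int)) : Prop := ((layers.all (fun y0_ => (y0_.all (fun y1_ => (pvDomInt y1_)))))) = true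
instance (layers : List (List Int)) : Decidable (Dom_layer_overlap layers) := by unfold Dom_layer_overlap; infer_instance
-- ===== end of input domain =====

-- B replaces the pair-driven double loop (one full set intersection per pair) by an element-driven
-- scheme over an inverted index (element -> list of layer indices); alternative decomposition.

-- ===== PORT A =====
def layer_overlap (layers : List (List Int)) : List (Int × Int × List Int) :=
  let ov : PySem.Dict (Int × Int) (List Int) :=
    (PySem.List.pyRange 0 ((layers.length : Int) - 1)).foldl (fun ov k =>
      (PySem.List.pyRange (k + 1) (layers.length : Int)).foldl (fun ov i =>
        if i == k then ov
        else ov.insert (k, i)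
          (PySem.Set.inter (PySem.List.pyGetD layers k []) (PySem.List.pyGetD layers i [])))
        ov)
      PySem.Dict.empty
  ov.items.map (fun p => (p.1.1, p.1.2, p.2))

-- ===== PORT B =====
def layer_overlap_alt (layers : List (List Int)) : List (Int × Int × List Int) :=
  let n : Int := layers.length
  -- index = {}; for j, layer in enumerate(layers): for e in layer: index.setdefault(e, []).append(j)
  let idx : PySem.Dict Int (List Int) :=
    (PySem.List.enumerate layers).foldl (fun d jl =>
      jl.2.foldl (fun d e => d.modify e [] (fun js => js ++ [jl.1])) d)
      PySem.Dict.empty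
  -- overlap = {(k, i): set() for k in range(n-1) for i in range(k+1, n)}
  let ov0 : PySem.Dict (Int × Int) (List Int) :=
    (PySem.List.pyRange 0 (n - 1)).foldl (fun ov k =>
      (PySem.List.pyRange (k + 1) n).foldl (fun ov i => ov.insert (k, i) ([] : List Int)) ov)
      PySem.Dict.empty
  -- for k in range(n-1): for e in layers[k]: for i in index[e]: if k < i: overlap[(k,i)].add(e)
  let ov : PySem.Dict (Int × Int) (List Int) :=
    (PySem.List.pyRange 0 (n - 1)).foldl (fun ov k =>
      (PySem.List.pyGetD layers k []).foldl (fun ov e =>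
        (idx.getD e []).foldl (fun ov i =>
          if k < i then ov.modify (k, i) [] (fun s => PySem.Set.add s e) else ov)
          ov)
        ov)
      ov0
  ov.items.map (fun p => (p.1.1, p.1.2, p.2))

-- ===== PRECONDITION & SPEC =====
-- Each layer is a Python set; under the type convention its List Int encoding holds DISTINCT
-- elements, so Pre_ only records that shape (it excludes no actual Python input of A).
def Pre_layer_overlap (layers : List (List Int)) : Prop := ∀ l ∈ layers, l.Nodup
instance (layers : List (List Int)) : Decidable (Pre_layer_overlap layers) := by unfold Pre_layer_overlap; infer_instance
def pvWitness_layer_overlap : List (List Int) := [[1, 2], [2, 3], [4]]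

def Spec_layer_overlap (layers : List (List Int)) (out : List (Int × Int × List Int)) : Prop := out = layer_overlap_alt layers
instance (layers : List (List Int)) (out : List (Int × Int × List Int)) : Decidable (Spec_layer_overlap layers out) := by unfold Spec_layer_overlap; infer_instance

-- ===== CLAIM (what is proved, stated in full; the proofs are below) =====
def Claim_equal_layer_overlap : Prop := ∀ (layers : List (List Int)), Dom_layer_overlap layers → Pre_layer_overlap layers → Spec_layer_overlap layers (layer_overlap layers)


-- ===== LEMMAS AND PROOFS =====

-- the list of index pairs (k, i), k < i, in A's (and B's pre-initialization) insertion order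
def pvPairs (n : Int) : List (Int × Int) :=
  (PySem.List.pyRange 0 (n - 1)).flatMap (fun k => (PySem.List.pyRange (k + 1) n).map (fun i => (k, i)))

-- A's value at key (k, i)
def pvInterK (layers : List (List Int)) (k i : Int) : List Int :=
  PySem.Set.inter (PySem.List.pyGetD layers k []) (PySem.List.pyGetD layers i [])

-- B's value at key (k, i), after the event fold is localized to one pair
def pvVB (layers : List (List Int)) (k i : Int) : List Int :=
  (PySem.List.pyGetD layers k []).foldl
    (fun s e => if (PySem.List.pyGetD layers i []).contains e then PySem.Set.add s e else s) []

lemma nodup_flatMap_tag {α β : Type} (l : List α) (f : α → List (α × β))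
    (hl : l.Nodup) (hf : ∀ k, (f k).Nodup) (ht : ∀ k p, p ∈ f k → p.1 = k) :
    (l.flatMap f).Nodup := by
  induction l with
  | nil => simp
  | cons a l ih =>
    rw [List.flatMap_cons, List.nodup_append]
    refine ⟨hf a, ih hl.of_cons, ?_⟩
    intro x hx y hy hxy
    rcases List.mem_flatMap.mp hy with ⟨k, hk, hyk⟩
    have h1 : x.1 = a := ht a x hx
    have h2 : y.1 = k := ht k y hyk
    have : a ∉ l := (List.nodup_cons.mp hl).1
    subst hxy
    rw [h1] at h2
    exact this (h2 ▸ hk)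

lemma nodup_pvPairs (n : Int) : (pvPairs n).Nodup := by
  refine nodup_flatMap_tag _ _ (PySem.List.nodup_pyRange_one _ _) (fun k => ?_) (fun k p hp => ?_)
  · exact (PySem.List.nodup_pyRange_one _ _).map (fun i j h => by simpa using h)
  · rcases List.mem_map.mp hp with ⟨i, _, rfl⟩; rfl

lemma mem_pvPairs (n k i : Int) :
    (k, i) ∈ pvPairs n ↔ 0 ≤ k ∧ k < n - 1 ∧ k + 1 ≤ i ∧ i < n := by
  simp only [pvPairs, List.mem_flatMap, List.mem_map, PySem.List.mem_pyRange_one]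
  constructor
  · rintro ⟨k', ⟨h1, h2⟩, i', ⟨h3, h4⟩, h5⟩
    obtain ⟨rfl, rfl⟩ : k' = k ∧ i' = i := by
      constructor <;> [exact congrArg Prod.fst h5; exact congrArg Prod.snd h5]
    exact ⟨h1, h2, h3, h4⟩
  · rintro ⟨h1, h2, h3, h4⟩
    exact ⟨k, ⟨h1, h2⟩, i, ⟨h3, h4⟩, rfl⟩

-- folding fresh-key inserts appends the new items in order
lemma dict_foldl_insert_fresh {κ ν : Type} [BEq κ] [LawfulBEq κ] [DecidableEq κ]
    (P : List κ) (f : κ → ν) :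
    ∀ (d : PySem.Dict κ ν), (d.keys ++ P).Nodup →
      P.foldl (fun d k => d.insert k (f k)) d = ⟨d.items ++ P.map (fun k => (k, f k))⟩ := by
  induction P with
  | nil => intro d _; simp
  | cons k P ih =>
    intro d hnd
    have hk : k ∉ d.keys := by
      intro hmem
      have := (List.nodup_append.mp hnd).2.2 k hmem k (List.mem_cons_self ..)
      exact this rfl
    have hcont : d.contains k = false := by
      rw [PySem.Dict.contains_eq_decide_mem_keys]
      simpa using hk
    have hins : d.insert k (f k) = ⟨d.items ++ [(k, f k)]⟩ := by
      simp [PySem.Dict.insert, hcont]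
    have hkeys : (PySem.Dict.mk (d.items ++ [(k, f k)]) : PySem.Dict κ ν).keys = d.keys ++ [k] := by
      simp [PySem.Dict.keys]
    have hnd' : ((PySem.Dict.mk (d.items ++ [(k, f k)]) : PySem.Dict κ ν).keys ++ P).Nodup := by
      rw [hkeys, List.append_assoc]
      simpa using hnd
    calc (k :: P).foldl (fun d k => d.insert k (f k)) d
        = P.foldl (fun d k => d.insert k (f k)) ⟨d.items ++ [(k, f k)]⟩ := by
          rw [List.foldl_cons, hins]
      _ = ⟨(d.items ++ [(k, f k)]) ++ P.map (fun k => (k, f k))⟩ := ih _ hnd'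
      _ = ⟨d.items ++ (k :: P).map (fun k => (k, f k))⟩ := by simp

lemma find?_map_pair {κ ν : Type} [BEq κ] [LawfulBEq κ] (P : List κ) (g : κ → ν) (q : κ)
    (hq : q ∈ P) :
    (P.map (fun p => (p, g p))).find? (fun pr => pr.1 == q) = some (q, g q) := by
  induction P with
  | nil => cases hq
  | cons a P ih =>
    by_cases h : a = q
    · subst h; simp
    · have hq' : q ∈ P := by
        rcases List.mem_cons.mp hq with h' | h'
        · exact absurd h'.symm h
        · exact h'
      simpa [List.find?_cons, h] using ih hq'

lemma contains_map_pair {κ ν : Type} [BEq κ] [LawfulBEq κ] (P : List κ) (g : κ → ν) (q : κ)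
    (hq : q ∈ P) :
    (PySem.Dict.mk (P.map (fun p => (p, g p))) : PySem.Dict κ ν).contains q = true := by
  simp only [PySem.Dict.contains, List.any_eq_true]
  exact ⟨(q, g q), List.mem_map.mpr ⟨q, hq, rfl⟩, by simp⟩

-- modifying key q of a "table" dict updates it pointwise
lemma dict_modify_map {κ ν : Type} [BEq κ] [LawfulBEq κ] [DecidableEq κ] (P : List κ) (g : κ → ν) (q : κ)
    (hq : q ∈ P) (d0 : ν) (f : ν → ν) :
    PySem.Dict.modify ⟨P.map (fun p => (p, g p))⟩ q d0 f
      = ⟨P.map (fun p => (p, if p = q then f (g p) else g p))⟩ := by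
  have hget : (PySem.Dict.mk (P.map (fun p => (p, g p))) : PySem.Dict κ ν).getD q d0 = g q := by
    simp [PySem.Dict.getD, PySem.Dict.get?, find?_map_pair P g q hq]
  rw [PySem.Dict.modify, hget, PySem.Dict.insert, contains_map_pair P g q hq]
  simp only [if_true]
  congr 1
  rw [List.map_map]
  apply List.map_congr_left
  intro p _
  by_cases h : p = q
  · subst h; simp
  · simp [h]

-- a fold of modifies over events on a "table" dict, localized per key
lemma dict_foldl_modify_map {κ ν σ : Type} [BEq κ] [LawfulBEq κ] [DecidableEq κ]
    (E : List σ) (key : σ → κ) (f : σ → ν → ν) (d0 : ν) (P : List κ)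
    (hE : ∀ s ∈ E, key s ∈ P) :
    ∀ (g : κ → ν),
      E.foldl (fun (d : PySem.Dict κ ν) s => d.modify (key s) d0 (f s)) ⟨P.map (fun p => (p, g p))⟩
        = ⟨P.map (fun p => (p, (E.filter (fun s => key s == p)).foldl (fun v s => f s v) (g p)))⟩ := by
  induction E with
  | nil => intro g; simp
  | cons s E ih =>
    intro g
    have hs : key s ∈ P := hE s (List.mem_cons_self ..)
    rw [List.foldl_cons, dict_modify_map P g (key s) hs d0 (f s),
        ih (fun s' hs' => hE s' (List.mem_cons_of_mem _ hs'))]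
    congr 1
    apply List.map_congr_left
    intro p _
    by_cases h : key s = p
    · simp [h]
    · simp [h, Ne.symm h]

lemma foldl_ite_filter {α β : Type} (p : α → Prop) [DecidablePred p] (f : β → α → β)
    (l : List α) (init : β) :
    l.foldl (fun acc x => if p x then f acc x else acc) init
      = (l.filter (fun x => decide (p x))).foldl f init := by
  induction l generalizing init with
  | nil => rfl
  | cons a l ih =>
    by_cases h : p a <;> simp [h, ih]

lemma foldl_replicate_add (k i e : Int) :
    ∀ (m : Nat) (v : List Int),
      (List.replicate m ((k, e, i) : Int × Int × Int)).foldl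
          (fun v s => PySem.Set.add v s.2.1) v
        = if m = 0 then v else PySem.Set.add v e := by
  intro m
  induction m with
  | zero => intro v; simp
  | succ m ih =>
    intro v
    rw [List.replicate_succ, List.foldl_cons, ih]
    by_cases h : m = 0 <;> simp [h]

lemma foldl_add_filter (c : Int → Bool) (xs : List Int) :
    ∀ (acc : List Int), (acc ++ xs).Nodup →
      xs.foldl (fun s e => if c e then PySem.Set.add s e else s) acc = acc ++ xs.filter c := by
  induction xs with
  | nil => intro acc _; simp
  | cons x xs ih =>
    intro acc hnd
    have hx : x ∉ acc := by
      intro hmem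
      exact (List.nodup_append.mp hnd).2.2 x hmem x (List.mem_cons_self ..) rfl
    by_cases hc : c x = true
    · rw [List.foldl_cons, if_pos hc]
      have hadd : PySem.Set.add acc x = acc ++ [x] := by
        simp [PySem.Set.add, hx]
      rw [hadd, ih (acc ++ [x]) (by rw [List.append_assoc]; simpa using hnd)]
      simp [hc]
    · rw [List.foldl_cons, if_neg hc]
      have hsub : (acc ++ xs).Sublist (acc ++ x :: xs) :=
        List.Sublist.append (List.Sublist.refl acc) (List.sublist_cons_self x xs)
      rw [ih acc (hnd.sublist hsub)]
      simp [hc]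

-- B's inverted index (the exact fold of the port) and its event list
def pvIdx (layers : List (List Int)) : PySem.Dict Int (List Int) :=
  (PySem.List.enumerate layers).foldl
    (fun (d : PySem.Dict Int (List Int)) jl =>
      jl.2.foldl (fun (d : PySem.Dict Int (List Int)) e => d.modify e [] (fun js => js ++ [jl.1])) d)
    PySem.Dict.empty

def pvEv (layers : List (List Int)) : List (Int × Int × Int) :=
  (PySem.List.pyRange 0 ((layers.length : Int) - 1)).flatMap (fun k =>
    (PySem.List.pyGetD layers k []).flatMap (fun e =>
      (((pvIdx layers).getD e []).filter (fun i => decide (k < i))).map (fun i => (k, e, i))))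

-- characterization of B's inverted index
lemma getD_idx_fold (layers : List (List Int)) (e : Int) :
    (pvIdx layers).getD e []
      = ((((PySem.List.enumerate layers).flatMap (fun jl => jl.2.map (fun x => (x, jl.1)))).filter
            (fun p => p.1 == e)).map (fun p => p.2)) := by
  have h : ∀ (d : PySem.Dict Int (List Int)),
      (PySem.List.enumerate layers).foldl
          (fun (d : PySem.Dict Int (List Int)) jl =>
            jl.2.foldl (fun (d : PySem.Dict Int (List Int)) x => d.modify x [] (fun js => js ++ [jl.1])) d) d
        = ((PySem.List.enumerate layers).flatMap (fun jl => jl.2.map (fun x => (x, jl.1)))).foldl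
            (fun (d : PySem.Dict Int (List Int)) p => d.modify p.1 [] (fun js => js ++ [p.2])) d := by
    intro d
    rw [List.foldl_flatMap]
    apply PySem.List.foldl_congr_mem
    intro acc jl _
    rw [List.foldl_map]
  rw [pvIdx, h, PySem.Dict.getD_foldl_modify_append]
  simp [PySem.Dict.getD, PySem.Dict.get?, PySem.Dict.empty]

lemma mem_idx (layers : List (List Int)) (e i : Int) :
    (i ∈ (pvIdx layers).getD e [])
      ↔ ∃ j : Nat, ∃ _ : j < layers.length, i = (j : Int) ∧ e ∈ layers[j] := by
  rw [getD_idx_fold]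
  simp only [List.mem_map, List.mem_filter, List.mem_flatMap, PySem.List.mem_enumerate_iff]
  constructor
  · rintro ⟨p, ⟨⟨jl, ⟨j, hj, rfl⟩, ⟨x, hx, rfl⟩⟩, hpe⟩, rfl⟩
    exact ⟨j, hj, by simp, by simpa using (by simpa using hpe : x = e) ▸ hx⟩
  · rintro ⟨j, hj, rfl, he⟩
    exact ⟨(e, (j : Int)), ⟨⟨((0 : Int) + j, layers[j]), ⟨j, hj, rfl⟩, ⟨e, he, by simp⟩⟩, by simp⟩, rfl⟩

lemma flatMap_eq_of_single {α β : Type} (l : List α) (f : α → List β) (k : α)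
    (hk : k ∈ l) (hl : l.Nodup) (h : ∀ x ∈ l, x ≠ k → f x = []) : l.flatMap f = f k := by
  induction l with
  | nil => cases hk
  | cons a l ih =>
    rw [List.flatMap_cons]
    by_cases ha : a = k
    · subst ha
      have : l.flatMap f = [] := by
        apply List.flatMap_eq_nil_iff.mpr
        intro x hx
        exact h x (List.mem_cons_of_mem _ hx) (fun hxa => (List.nodup_cons.mp hl).1 (hxa ▸ hx))
      simp [this]
    · have hk' : k ∈ l := by
        rcases List.mem_cons.mp hk with h' | h'
        · exact absurd h'.symm ha
        · exact h'
      rw [h a (List.mem_cons_self ..) ha, ih hk' (List.nodup_cons.mp hl).2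
        (fun x hx => h x (List.mem_cons_of_mem _ hx))]
      simp

lemma mem_key_pvEv (layers : List (List Int)) :
    ∀ s ∈ pvEv layers, ((s.1, s.2.2) : Int × Int) ∈ pvPairs (layers.length : Int) := by
  intro s hs
  unfold pvEv at hs
  simp only [List.mem_flatMap, List.mem_map, List.mem_filter,
    PySem.List.mem_pyRange_one, decide_eq_true_eq] at hs
  obtain ⟨k, ⟨hk0, hk1⟩, e, _he, i, ⟨hiI, hki⟩, rfl⟩ := hs
  rcases (mem_idx layers e i).mp hiI with ⟨j, hj, rfl, _⟩
  dsimp only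
  apply (mem_pvPairs _ _ _).mpr
  have : ((j : Int)) < (layers.length : Int) := by exact_mod_cast hj
  exact ⟨hk0, hk1, by omega, this⟩

-- the per-pair value of B's event fold
lemma W_eq_vB (layers : List (List Int)) (k i : Int)
    (hk0 : 0 ≤ k) (hk1 : k < (layers.length : Int) - 1) (hki : k + 1 ≤ i)
    (hin : i < (layers.length : Int)) :
    ((pvEv layers).filter (fun s => (((s.1, s.2.2) : Int × Int) == (k, i)))).foldl
        (fun v s => PySem.Set.add v s.2.1) []
      = pvVB layers k i := by
  have hitn : i.toNat < layers.length := by omega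
  have hLi : PySem.List.pyGetD layers i [] = layers[i.toNat] := by
    rw [PySem.List.pyGetD_of_nonneg _ _ (by omega), List.getD_eq_getElem _ _ hitn]
  have hki' : k < i := by omega
  unfold pvEv
  simp only [List.filter_flatMap, List.filter_map, Function.comp_def]
  -- only the k-block survives the filter
  rw [flatMap_eq_of_single _ _ k (PySem.List.mem_pyRange_one.mpr ⟨hk0, hk1⟩)
    (PySem.List.nodup_pyRange_one _ _) ?hz]
  case hz =>
    intro k' _ hne
    apply List.flatMap_eq_nil_iff.mpr
    intro e _
    rw [List.map_eq_nil_iff]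
    apply List.filter_eq_nil_iff.mpr
    intro a _
    simp [hne]
  -- inside the k-block the filter picks the occurrences of i
  simp only [List.filter_filter]
  have hfun : ∀ e, (((pvIdx layers).getD e []).filter
        (fun a => ((((k, a) : Int × Int) == (k, i)) && decide (k < a))))
      = List.replicate (((pvIdx layers).getD e []).count i) i := by
    intro e
    rw [← List.filter_beq]
    apply List.filter_congr
    intro a _
    by_cases h : a = i
    · subst h; simp [hki']
    · have h1 : (((k, a) : Int × Int) == (k, i)) = false := by
        simp [beq_eq_false_iff_ne, Prod.ext_iff, h]
      have h2 : ((a : Int) == i) = false := by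
        simp [beq_eq_false_iff_ne, h]
      simp [h1, h2]
  simp only [hfun, List.map_replicate]
  rw [List.foldl_flatMap]
  unfold pvVB
  apply PySem.List.foldl_congr_mem
  intro acc e _
  rw [foldl_replicate_add]
  have hmem : i ∈ (pvIdx layers).getD e [] ↔ e ∈ layers[i.toNat] := by
    rw [mem_idx]
    constructor
    · rintro ⟨j, hj, rfl, hej⟩
      simpa using hej
    · intro he
      exact ⟨i.toNat, hitn, by omega, he⟩
  by_cases hc : e ∈ layers[i.toNat]
  · have : ((pvIdx layers).getD e []).count i ≠ 0 := by
      rw [Ne, List.count_eq_zero]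
      exact fun hni => hni (hmem.mpr hc)
    simp [this, hLi, hc]
  · have : ((pvIdx layers).getD e []).count i = 0 := by
      rw [List.count_eq_zero]
      exact fun hii => hc (hmem.mp hii)
    simp [this, hLi, hc]

-- A as a table over pvPairs
lemma layer_overlap_eq_map (layers : List (List Int)) :
    layer_overlap layers
      = (pvPairs (layers.length : Int)).map (fun p => (p.1, p.2, pvInterK layers p.1 p.2)) := by
  have h0 : layer_overlap layers =
      ((PySem.List.pyRange 0 ((layers.length : Int) - 1)).foldl
        (fun (ov : PySem.Dict (Int × Int) (List Int)) k =>
          (PySem.List.pyRange (k + 1) (layers.length : Int)).foldl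
            (fun ov i => if i == k then ov
              else ov.insert (k, i)
                (PySem.Set.inter (PySem.List.pyGetD layers k []) (PySem.List.pyGetD layers i [])))
            ov)
        PySem.Dict.empty).items.map (fun p => (p.1.1, p.1.2, p.2)) := rfl
  rw [h0]
  have h1 :
      (PySem.List.pyRange 0 ((layers.length : Int) - 1)).foldl
          (fun (ov : PySem.Dict (Int × Int) (List Int)) k =>
            (PySem.List.pyRange (k + 1) (layers.length : Int)).foldl
              (fun ov i => if i == k then ov
                else ov.insert (k, i)
                  (PySem.Set.inter (PySem.List.pyGetD layers k []) (PySem.List.pyGetD layers i [])))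
              ov)
          PySem.Dict.empty
        = (pvPairs (layers.length : Int)).foldl
            (fun (ov : PySem.Dict (Int × Int) (List Int)) p =>
              ov.insert p (pvInterK layers p.1 p.2))
            PySem.Dict.empty := by
    rw [pvPairs, List.foldl_flatMap]
    apply PySem.List.foldl_congr_mem
    intro acc k _
    rw [List.foldl_map]
    apply PySem.List.foldl_congr_mem
    intro acc2 i hi
    have hik : (i == k) = false := by
      have := (PySem.List.mem_pyRange_one.mp hi).1
      simp only [beq_eq_false_iff_ne, Ne]
      omega
    simp [hik, pvInterK]
  rw [h1, dict_foldl_insert_fresh (pvPairs (layers.length : Int))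
        (fun p => pvInterK layers p.1 p.2) PySem.Dict.empty
        (by simpa [PySem.Dict.empty, PySem.Dict.keys] using nodup_pvPairs (layers.length : Int))]
  simp [PySem.Dict.empty, List.map_map, Function.comp_def]

-- B as a table over pvPairs
lemma layer_overlap_alt_eq_map (layers : List (List Int)) :
    layer_overlap_alt layers
      = (pvPairs (layers.length : Int)).map (fun p => (p.1, p.2, pvVB layers p.1 p.2)) := by
  have h0 : layer_overlap_alt layers =
      ((PySem.List.pyRange 0 ((layers.length : Int) - 1)).foldl
        (fun (ov : PySem.Dict (Int × Int) (List Int)) k =>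
          (PySem.List.pyGetD layers k []).foldl (fun ov e =>
            ((pvIdx layers).getD e []).foldl (fun ov i =>
              if k < i then ov.modify (k, i) [] (fun s => PySem.Set.add s e) else ov) ov) ov)
        ((PySem.List.pyRange 0 ((layers.length : Int) - 1)).foldl
          (fun (ov : PySem.Dict (Int × Int) (List Int)) k =>
            (PySem.List.pyRange (k + 1) (layers.length : Int)).foldl
              (fun ov i => ov.insert (k, i) ([] : List Int)) ov)
          PySem.Dict.empty)).items.map (fun p => (p.1.1, p.1.2, p.2)) := rfl
  rw [h0]
  have hov0 :
      (PySem.List.pyRange 0 ((layers.length : Int) - 1)).foldl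
          (fun (ov : PySem.Dict (Int × Int) (List Int)) k =>
            (PySem.List.pyRange (k + 1) (layers.length : Int)).foldl
              (fun ov i => ov.insert (k, i) ([] : List Int)) ov)
          PySem.Dict.empty
        = ⟨(pvPairs (layers.length : Int)).map (fun p => (p, ([] : List Int)))⟩ := by
    have h1 :
        (PySem.List.pyRange 0 ((layers.length : Int) - 1)).foldl
            (fun (ov : PySem.Dict (Int × Int) (List Int)) k =>
              (PySem.List.pyRange (k + 1) (layers.length : Int)).foldl
                (fun ov i => ov.insert (k, i) ([] : List Int)) ov)
            PySem.Dict.empty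
          = (pvPairs (layers.length : Int)).foldl
              (fun (ov : PySem.Dict (Int × Int) (List Int)) p => ov.insert p ([] : List Int))
              PySem.Dict.empty := by
      rw [pvPairs, List.foldl_flatMap]
      apply PySem.List.foldl_congr_mem
      intro acc k _
      rw [List.foldl_map]
    rw [h1, dict_foldl_insert_fresh (pvPairs (layers.length : Int))
          (fun _ => ([] : List Int)) PySem.Dict.empty
          (by simpa [PySem.Dict.empty, PySem.Dict.keys] using nodup_pvPairs (layers.length : Int))]
    simp [PySem.Dict.empty]
  rw [hov0]
  have hbig : ∀ (d : PySem.Dict (Int × Int) (List Int)),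
      (PySem.List.pyRange 0 ((layers.length : Int) - 1)).foldl
          (fun (ov : PySem.Dict (Int × Int) (List Int)) k =>
            (PySem.List.pyGetD layers k []).foldl (fun ov e =>
              ((pvIdx layers).getD e []).foldl (fun ov i =>
                if k < i then ov.modify (k, i) [] (fun s => PySem.Set.add s e) else ov) ov) ov) d
        = (pvEv layers).foldl
            (fun (d : PySem.Dict (Int × Int) (List Int)) s =>
              d.modify (s.1, s.2.2) [] (fun v => PySem.Set.add v s.2.1)) d := by
    intro d
    rw [pvEv, List.foldl_flatMap]
    apply PySem.List.foldl_congr_mem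
    intro acc k _
    rw [List.foldl_flatMap]
    apply PySem.List.foldl_congr_mem
    intro acc2 e _
    rw [foldl_ite_filter (fun i => k < i)
      (fun (ov : PySem.Dict (Int × Int) (List Int)) i =>
        ov.modify (k, i) [] (fun s => PySem.Set.add s e)) _ acc2]
    rw [List.foldl_map]
  rw [hbig, dict_foldl_modify_map (pvEv layers) (fun s => ((s.1, s.2.2) : Int × Int))
        (fun s v => PySem.Set.add v s.2.1) [] (pvPairs (layers.length : Int))
        (mem_key_pvEv layers) (fun _ => ([] : List Int))]
  simp only [List.map_map]
  apply List.map_congr_left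
  rintro ⟨k, i⟩ hp
  rcases (mem_pvPairs _ k i).mp hp with ⟨hk0, hk1, hki, hin⟩
  simp only [Function.comp_apply]
  rw [W_eq_vB layers k i hk0 hk1 hki hin]

-- ===== VERDICT (by name: the statement is the Claim_ definition above) =====
theorem layer_overlap_spec : Claim_equal_layer_overlap := by
  intro layers _hdom hpre
  unfold Spec_layer_overlap
  rw [layer_overlap_eq_map, layer_overlap_alt_eq_map]
  apply List.map_congr_left
  rintro ⟨k, i⟩ hmem
  rcases (mem_pvPairs _ k i).mp hmem with ⟨hk0, hk1, _hi0, _hi1⟩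
  simp only [Prod.mk.injEq]
  refine ⟨trivial, trivial, ?_⟩
  have hkn : k.toNat < layers.length := by omega
  have hLk : PySem.List.pyGetD layers k [] = layers[k.toNat] := by
    rw [PySem.List.pyGetD_of_nonneg _ _ hk0, List.getD_eq_getElem _ _ hkn]
  have hnodup : (layers[k.toNat]).Nodup := hpre _ (layers.getElem_mem hkn)
  unfold pvInterK pvVB
  rw [foldl_add_filter _ _ [] (by simpa [hLk] using hnodup)]
  simp only [PySem.Set.inter, List.nil_append]
  rfl
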